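-- pv_equiv track=rewrite | github.com/sakaikomaru/mypylib | StringAlgorithm/Manacher.py | enumerate_palindromes
-- ===== SOURCE A (Python) =====
-- def palindromes(S):
--     n = len(S)
--     p = [[0] * (n + 1), [0] * n]
--     for z in range(2):
--         l, r = 0, 0
--         for i in range(n):
--             zz = 0 if z == 1 else 1
--             t = r - i + zz
--             if i < r:
--                 p[z][i] = min(t, p[z][l + t])
--             L, R = i - p[z][i], i + p[z][i] - zz
--             while L != 0 and R + 1 < n and S[L - 1] == S[R + 1]:
--                 p[z][i] += 1
--                 L -= 1
--                 R += 1
--             if R > r: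
--                 l = L
--                 r = R
--     return p
--
-- def enumerate_palindromes(S):
--     [even, odd] = palindromes(S)
--     res = [0] * (2 * len(S) - 1)
--     even = even[1::]
--     for i in range(2 * len(S) - 1):
--         if i % 2 == 0:
--             res[i] = 2 * odd[i // 2] + 1
--         else:
--             res[i] = 2 * even[i // 2]
--     return res
-- ===== SOURCE B (Python) =====
-- def enumerate_palindromes(S):
--     n = len(S)
--     res = []
--     for i in range(2 * n - 1):
--         c = i // 2
--         r = 0
--         if i % 2 == 0:
--             while c - r > 0 and c + r + 1 < n and S[c - r - 1] == S[c + r + 1]: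
--                 r += 1
--             res.append(2 * r + 1)
--         else:
--             while c - r >= 0 and c + r + 1 < n and S[c - r] == S[c + r + 1]:
--                 r += 1
--             res.append(2 * r)
--     return res
-- ===== Notes on version B (the rewrite author's own statement) =====
-- stated objective: simpler
-- what changed: Replaces Manacher's algorithm (two passes maintaining a radius table, a rightmost-palindrome window (l, r) and the mirror initialisation min(t, p[l+t]), then a reassembly loop) by direct expand-around-center: one loop over the 2n-1 centers, each expanding naively from radius 0, with no shared state between centers.
import Mathlib
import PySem

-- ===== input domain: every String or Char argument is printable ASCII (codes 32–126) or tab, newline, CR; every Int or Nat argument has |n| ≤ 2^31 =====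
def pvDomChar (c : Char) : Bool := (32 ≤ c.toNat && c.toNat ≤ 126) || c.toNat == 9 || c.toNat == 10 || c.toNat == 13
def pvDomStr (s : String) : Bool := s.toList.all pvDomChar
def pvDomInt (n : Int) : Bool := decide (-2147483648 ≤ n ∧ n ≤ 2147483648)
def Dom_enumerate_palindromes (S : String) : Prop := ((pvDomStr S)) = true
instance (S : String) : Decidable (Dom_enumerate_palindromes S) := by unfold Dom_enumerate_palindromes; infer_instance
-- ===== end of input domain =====

-- B replaces Manacher's p-table/reflection machinery by direct expand-around-center at each of the 2n-1 centers: simpler, no shared state.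


-- ===== PORT A =====
-- 'L != 0 and R + 1 < n and S[L-1] == S[R+1]' (short-circuit: the indexings happen only when both guards hold)
def pvCondA (s : List Char) (nn L R : Int) : Bool :=
  decide (L ≠ 0) && decide (R + 1 < nn) &&
    decide (PySem.List.pyGet? s (L - 1) = PySem.List.pyGet? s (R + 1))

-- the 'while' loop of palindromes(); fuel s.length always suffices (R < n and R grows each step)
def pvWhileA (s : List Char) (nn : Int) : Nat → Int → Int → Int → Int × Int × Int
  | 0, pi, L, R => (pi, L, R)
  | fuel + 1, pi, L, R =>
    if pvCondA s nn L R then pvWhileA s nn fuel (pi + 1) (L - 1) (R + 1) else (pi, L, R)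

-- one iteration of 'for i in range(n)': state (l, r, p[z])
def pvManStep (s : List Char) (nn zz i : Int) : Int × Int × List Int → Int × Int × List Int
  | (l, r, p) =>
    let t := r - i + zz
    let p1 := if i < r then p.set i.toNat (min t (p.getD (l + t).toNat 0)) else p
    let pi0 := p1.getD i.toNat 0
    let res := pvWhileA s nn s.length pi0 (i - pi0) (i + pi0 - zz)
    let p2 := p1.set i.toNat res.1
    if res.2.2 > r then (res.2.1, res.2.2, p2) else (l, r, p2)

-- the 'for i in range(n)' loop for one z (zz = 1 for z = 0, zz = 0 for z = 1)
def pvManacher (s : List Char) (nn zz : Int) (init : List Int) : List Int :=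
  ((PySem.List.pyRange 0 nn 1).foldl (fun st i => pvManStep s nn zz i st) (0, 0, init)).2.2

def pvPalindromes (s : List Char) : List (List Int) :=
  let nn : Int := s.length
  [pvManacher s nn 1 (List.replicate (s.length + 1) 0),
   pvManacher s nn 0 (List.replicate s.length 0)]

def enumerate_palindromes (S : String) : List Int :=
  let s := S.toList
  let ps := pvPalindromes s
  let evn := PySem.List.slice (ps.getD 0 []) (some 1) none
  let odd := ps.getD 1 []
  (PySem.List.pyRange 0 (2 * (s.length : Int) - 1) 1).map (fun i =>
    if PySem.Int.mod i 2 == 0 then 2 * odd.getD (PySem.Int.floordiv i 2).toNat 0 + 1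
    else 2 * evn.getD (PySem.Int.floordiv i 2).toNat 0)

-- ===== PORT B =====
-- 'while c - r > 0 and c + r + 1 < n and S[c-r-1] == S[c+r+1]: r += 1'
def pvGrowOdd (s : List Char) (nn c : Int) : Nat → Int → Int
  | 0, r => r
  | fuel + 1, r =>
    if decide (c - r > 0) && decide (c + r + 1 < nn) &&
        decide (PySem.List.pyGet? s (c - r - 1) = PySem.List.pyGet? s (c + r + 1))
    then pvGrowOdd s nn c fuel (r + 1) else r

-- 'while c - r >= 0 and c + r + 1 < n and S[c-r] == S[c+r+1]: r += 1'
def pvGrowEven (s : List Char) (nn c : Int) : Nat → Int → Int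
  | 0, r => r
  | fuel + 1, r =>
    if decide (c - r ≥ 0) && decide (c + r + 1 < nn) &&
        decide (PySem.List.pyGet? s (c - r) = PySem.List.pyGet? s (c + r + 1))
    then pvGrowEven s nn c fuel (r + 1) else r

def enumerate_palindromes_alt (S : String) : List Int :=
  let s := S.toList
  let nn : Int := s.length
  (PySem.List.pyRange 0 (2 * nn - 1) 1).map (fun i =>
    let c := PySem.Int.floordiv i 2
    if PySem.Int.mod i 2 == 0 then 2 * pvGrowOdd s nn c s.length 0 + 1
    else 2 * pvGrowEven s nn c s.length 0)

-- ===== PRECONDITION & SPEC =====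
def Spec_enumerate_palindromes (S : String) (out : List Int) : Prop := out = enumerate_palindromes_alt S
instance (S : String) (out : List Int) : Decidable (Spec_enumerate_palindromes S out) := by unfold Spec_enumerate_palindromes; infer_instance

-- ===== CLAIM (what is proved, stated in full; the proofs are below) =====
def Claim_equal_enumerate_palindromes : Prop := ∀ (S : String), Dom_enumerate_palindromes S → Spec_enumerate_palindromes S (enumerate_palindromes S)

-- ===== LEMMAS AND PROOFS =====

-- the guard of A's while loop as a function of the center i and candidate radius q
def pvCondAt (s : List Char) (zz i q : Int) : Bool := pvCondA s s.length (i - q) (i + q - zz)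

lemma pvRad_ex (s : List Char) (zz i : Int) : ∃ q : Nat, pvCondAt s zz i q = false := by
  refine ⟨(s.length + 1 + zz - i).toNat, ?_⟩
  simp only [pvCondAt, pvCondA, Bool.and_eq_false_iff]
  left; right
  simp only [decide_eq_false_iff_not, not_lt]
  omega

-- the exact radius at center i (the least q where the guard fails)
def pvRad (s : List Char) (zz i : Int) : Nat := Nat.find (pvRad_ex s zz i)

lemma pvRad_false (s : List Char) (zz i : Int) : pvCondAt s zz i (pvRad s zz i) = false :=
  Nat.find_spec (pvRad_ex s zz i)

lemma pvRad_true (s : List Char) (zz i : Int) (q : Int) (h0 : 0 ≤ q)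
    (hq : q < (pvRad s zz i : Int)) : pvCondAt s zz i q = true := by
  have h1 : q.toNat < pvRad s zz i := by omega
  have := Nat.find_min (pvRad_ex s zz i) h1
  simpa [Bool.not_eq_false, show ((q.toNat : Int)) = q by omega] using this

lemma pvCondAt_true_iff (s : List Char) (zz i q : Int) :
    pvCondAt s zz i q = true ↔
      (i - q ≠ 0 ∧ i + q - zz + 1 < (s.length : Int) ∧
        PySem.List.pyGet? s (i - q - 1) = PySem.List.pyGet? s (i + q - zz + 1)) := by
  simp only [pvCondAt, pvCondA, Bool.and_eq_true, decide_eq_true_eq, and_assoc]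

lemma pvRad_le (s : List Char) (zz i : Int) (h0 : 0 ≤ i) : (pvRad s zz i : Int) ≤ i := by
  by_contra h
  have := pvRad_true s zz i i h0 (by omega)
  rw [pvCondAt_true_iff] at this
  omega

lemma pvRad_right (s : List Char) (zz i : Int) (hzz : 0 ≤ zz) (hi : i < (s.length : Int)) :
    i + (pvRad s zz i : Int) - zz < (s.length : Int) := by
  rcases Nat.eq_zero_or_pos (pvRad s zz i) with h | h
  · omega
  · have := pvRad_true s zz i ((pvRad s zz i : Int) - 1) (by omega) (by omega)
    rw [pvCondAt_true_iff] at this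
    omega

-- matched pairs: S[i0 - d] == S[i0 + d - zz] for 1 ≤ d ≤ rad
lemma pvRad_pair (s : List Char) (zz i0 d : Int) (h1 : 1 ≤ d) (h2 : d ≤ (pvRad s zz i0 : Int)) :
    PySem.List.pyGet? s (i0 - d) = PySem.List.pyGet? s (i0 + d - zz) := by
  have := pvRad_true s zz i0 (d - 1) (by omega) (by omega)
  rw [pvCondAt_true_iff] at this
  have h3 := this.2.2
  have e1 : i0 - (d - 1) - 1 = i0 - d := by ring
  have e2 : i0 + (d - 1) - zz + 1 = i0 + d - zz := by ring
  rw [e1, e2] at h3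
  exact h3

-- the maximal palindrome at center i0 is symmetric: positions of [l, r] summing to 2*i0 - zz hold equal chars
lemma pvMirror (s : List Char) (zz i0 a b : Int) (hzz : zz = 0 ∨ zz = 1)
    (hla : i0 - (pvRad s zz i0 : Int) ≤ a) (har : a ≤ i0 + (pvRad s zz i0 : Int) - zz)
    (hab : a + b = 2 * i0 - zz) :
    PySem.List.pyGet? s a = PySem.List.pyGet? s b := by
  rcases le_or_gt a b with hle | hgt
  · rcases eq_or_lt_of_le hle with rfl | hlt
    · rfl
    · have hd1 : 1 ≤ i0 - a := by omega
      have := pvRad_pair s zz i0 (i0 - a) hd1 (by omega)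
      have e1 : i0 - (i0 - a) = a := by ring
      have e2 : i0 + (i0 - a) - zz = b := by omega
      rw [e1, e2] at this
      exact this
  · have hd1 : 1 ≤ i0 - b := by omega
    have := pvRad_pair s zz i0 (i0 - b) hd1 (by omega)
    have e1 : i0 - (i0 - b) = b := by ring
    have e2 : i0 + (i0 - b) - zz = a := by omega
    rw [e1, e2] at this
    exact this.symm

-- soundness of Manacher's initialisation min(t, p[l+t]): every radius below it satisfies the guard
lemma pvInit_sound (s : List Char) (zz : Int) (hzz : zz = 0 ∨ zz = 1) (i0 i q : Int)
    (h00 : 0 ≤ i0) (hi0 : i0 < i) (hi : i < (s.length : Int))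
    (hir : i < i0 + (pvRad s zz i0 : Int) - zz)
    (hq0 : 0 ≤ q)
    (hqt : q < i0 + (pvRad s zz i0 : Int) - zz - i + zz)
    (hqr : q < (pvRad s zz (2 * i0 - i) : Int)) :
    pvCondAt s zz i q = true := by
  set rad : Int := (pvRad s zz i0 : Int) with hrad
  have hl0 : 0 ≤ i0 - rad := by have := pvRad_le s zz i0 h00; omega
  have hrn : i0 + rad - zz < (s.length : Int) := pvRad_right s zz i0 (by omega) (by omega)
  have hj0 : 0 ≤ 2 * i0 - i := by omega
  have hjle : (pvRad s zz (2 * i0 - i) : Int) ≤ 2 * i0 - i := pvRad_le s zz (2 * i0 - i) hj0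
  rw [pvCondAt_true_iff]
  refine ⟨by omega, by omega, ?_⟩
  -- mirror S[i-q-1] to S[(2 i0 - i) + q - zz + 1] and S[i+q-zz+1] to S[(2 i0 - i) - q - 1]
  have m1 : PySem.List.pyGet? s (i - q - 1) = PySem.List.pyGet? s ((2 * i0 - i) + q - zz + 1) := by
    apply pvMirror s zz i0 _ _ hzz (by omega) (by omega) (by ring)
  have m2 : PySem.List.pyGet? s (i + q - zz + 1) = PySem.List.pyGet? s ((2 * i0 - i) - q - 1) := by
    apply pvMirror s zz i0 _ _ hzz (by omega) (by omega) (by ring)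
  have hcj := pvRad_true s zz (2 * i0 - i) q hq0 hqr
  rw [pvCondAt_true_iff] at hcj
  rw [m1, m2, ← hcj.2.2]

-- A's while loop, started at any sound radius p0 ≤ rad, stops exactly at rad
lemma pvWhileA_eq (s : List Char) (zz i : Int) :
    ∀ (fuel : Nat) (p0 : Int), 0 ≤ p0 → p0 ≤ (pvRad s zz i : Int) →
    (pvRad s zz i : Int) ≤ p0 + fuel →
    pvWhileA s (s.length : Int) fuel p0 (i - p0) (i + p0 - zz)
      = ((pvRad s zz i : Int), i - (pvRad s zz i : Int), i + (pvRad s zz i : Int) - zz)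
  | 0, p0, h0, hle, hfuel => by
    have : p0 = (pvRad s zz i : Int) := by omega
    subst this; rfl
  | fuel + 1, p0, h0, hle, hfuel => by
    have hc : pvCondA s (s.length : Int) (i - p0) (i + p0 - zz) = pvCondAt s zz i p0 := rfl
    rcases eq_or_lt_of_le hle with heq | hlt
    · rw [pvWhileA, hc, heq, pvRad_false]
      simp
    · rw [pvWhileA, hc, pvRad_true s zz i p0 h0 hlt]
      simp only [if_true]
      have e1 : i - p0 - 1 = i - (p0 + 1) := by ring
      have e2 : i + p0 - zz + 1 = i + (p0 + 1) - zz := by ring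
      rw [e1, e2]
      exact pvWhileA_eq s zz i fuel (p0 + 1) (by omega) (by omega) (by omega)

-- B's odd expansion computes the exact radius
lemma pvGrowOdd_eq (s : List Char) (c : Int) (hc : 0 ≤ c) :
    ∀ (fuel : Nat) (r0 : Int), 0 ≤ r0 → r0 ≤ (pvRad s 0 c : Int) →
    (pvRad s 0 c : Int) ≤ r0 + fuel →
    pvGrowOdd s (s.length : Int) c fuel r0 = (pvRad s 0 c : Int)
  | 0, r0, h0, hle, hfuel => by simp only [pvGrowOdd]; omega
  | fuel + 1, r0, h0, hle, hfuel => by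
    have hcle : (pvRad s 0 c : Int) ≤ c := pvRad_le s 0 c hc
    have hb : (decide (c - r0 > 0) && decide (c + r0 + 1 < (s.length : Int)) &&
        decide (PySem.List.pyGet? s (c - r0 - 1) = PySem.List.pyGet? s (c + r0 + 1)))
        = pvCondAt s 0 c r0 := by
      simp only [pvCondAt, pvCondA]
      have e1 : decide (c - r0 > 0) = decide (c - r0 ≠ 0) := by
        apply decide_eq_decide.mpr; omega
      have e2 : decide (c + r0 + 1 < (s.length : Int)) = decide (c + r0 - 0 + 1 < (s.length : Int)) := by
        apply decide_eq_decide.mpr; omega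
      rw [e1, e2]
      norm_num
    rcases eq_or_lt_of_le hle with heq | hlt
    · rw [pvGrowOdd, hb, heq, pvRad_false]
      simp
    · rw [pvGrowOdd, hb, pvRad_true s 0 c r0 h0 hlt]
      simp only [if_true]
      exact pvGrowOdd_eq s c hc fuel (r0 + 1) (by omega) (by omega) (by omega)

-- B's even expansion at gap (c, c+1) computes the exact radius of A's even center c+1
lemma pvGrowEven_eq (s : List Char) (c : Int) (hc : 0 ≤ c) :
    ∀ (fuel : Nat) (r0 : Int), 0 ≤ r0 → r0 ≤ (pvRad s 1 (c + 1) : Int) →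
    (pvRad s 1 (c + 1) : Int) ≤ r0 + fuel →
    pvGrowEven s (s.length : Int) c fuel r0 = (pvRad s 1 (c + 1) : Int)
  | 0, r0, h0, hle, hfuel => by simp only [pvGrowEven]; omega
  | fuel + 1, r0, h0, hle, hfuel => by
    have hcle : (pvRad s 1 (c + 1) : Int) ≤ c + 1 := pvRad_le s 1 (c + 1) (by omega)
    have hb : (decide (c - r0 ≥ 0) && decide (c + r0 + 1 < (s.length : Int)) &&
        decide (PySem.List.pyGet? s (c - r0) = PySem.List.pyGet? s (c + r0 + 1)))
        = pvCondAt s 1 (c + 1) r0 := by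
      simp only [pvCondAt, pvCondA]
      have e1 : decide (c - r0 ≥ 0) = decide ((c + 1) - r0 ≠ 0) := by
        apply decide_eq_decide.mpr; omega
      have e2 : decide (c + r0 + 1 < (s.length : Int)) = decide ((c + 1) + r0 - 1 + 1 < (s.length : Int)) := by
        apply decide_eq_decide.mpr; omega
      have e3 : c - r0 = (c + 1) - r0 - 1 := by ring
      have e4 : c + r0 + 1 = (c + 1) + r0 - 1 + 1 := by ring
      rw [e1, e2, e3, e4]
    rcases eq_or_lt_of_le hle with heq | hlt
    · rw [pvGrowEven, hb, heq, pvRad_false]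
      simp
    · rw [pvGrowEven, hb, pvRad_true s 1 (c + 1) r0 h0 hlt]
      simp only [if_true]
      exact pvGrowEven_eq s c hc fuel (r0 + 1) (by omega) (by omega) (by omega)

-- main invariant for A's outer loop
lemma pvManLoop_inv (s : List Char) (zz : Int) (hzz : zz = 0 ∨ zz = 1) :
    ∀ (k i : Nat) (l r : Int) (p : List Int), i + k = s.length →
    s.length ≤ p.length →
    (∀ j : Nat, j < i → p.getD j 0 = (pvRad s zz j : Int)) →
    (∀ j : Nat, i ≤ j → p.getD j 0 = 0) →
    ((l = 0 ∧ r = 0) ∨ ∃ i0 : Nat, i0 < i ∧ i0 < s.length ∧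
        l = (i0 : Int) - (pvRad s zz i0 : Int) ∧ r = (i0 : Int) + (pvRad s zz i0 : Int) - zz) →
    ∀ j : Nat, j < s.length →
      (((PySem.List.pyRange i (s.length : Int) 1).foldl
          (fun st x => pvManStep s (s.length : Int) zz x st) (l, r, p)).2.2).getD j 0
        = (pvRad s zz j : Int) := by
  intro k
  induction k with
  | zero =>
    intro i l r p hik hl ha h0 hlr j hj
    rw [PySem.List.pyRange_one_eq_nil (by omega)]
    exact ha j (by omega)
  | succ k ih =>
    intro i l r p hik hl ha h0 hlr j hj
    have hi : (i : Int) < (s.length : Int) := by omega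
    have hip : i < p.length := by omega
    rw [PySem.List.pyRange_one_cons hi, List.foldl_cons]
    -- the value of p[z][i] after the reflection initialisation, and its soundness
    obtain ⟨m, hp1, hm0, hmle⟩ :
        ∃ m : Int,
          (if (i : Int) < r then p.set (i : Int).toNat
              (min (r - i + zz) (p.getD ((l + (r - i + zz)).toNat) 0)) else p).getD (i : Int).toNat 0 = m
          ∧ 0 ≤ m ∧ m ≤ (pvRad s zz i : Int) := by
      by_cases hir : (i : Int) < r
      · rcases hlr with ⟨rfl, rfl⟩ | ⟨i0, hi0i, hi0n, hle', hre'⟩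
        · omega
        · have hrad0 : (pvRad s zz i0 : Int) ≤ (i0 : Int) := pvRad_le s zz i0 (by omega)
          have hj0 : (2 * (i0 : Int) - i) = ((2 * i0 - i : Nat) : Int) := by omega
          have hlt : (l + (r - i + zz)).toNat = 2 * i0 - i := by omega
          have hjlti : 2 * i0 - i < i := by omega
          have hpj := ha (2 * i0 - i) hjlti
          rw [← hj0] at hpj
          refine ⟨min (r - i + zz) ((pvRad s zz (2 * i0 - i) : Int)), ?_, ?_, ?_⟩
          · rw [if_pos hir, hlt, hpj]
            simp [List.getD_eq_getElem?_getD, hip, Int.toNat_natCast]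
          · omega
          · -- soundness of the initialisation, hence ≤ the true radius
            have hsound : ∀ q : Int, 0 ≤ q →
                q < min (r - i + zz) ((pvRad s zz (2 * i0 - i) : Int)) →
                pvCondAt s zz i q = true := by
              intro q hq0 hqm
              obtain ⟨hqa, hqb⟩ := lt_min_iff.mp hqm
              exact pvInit_sound s zz hzz i0 i q (by omega) (by omega) hi
                (by omega) hq0 (by omega) hqb
            by_contra hcon
            have := hsound (pvRad s zz i) (by omega) (by omega)
            rw [pvRad_false] at this
            exact absurd this (by simp)
      · exact ⟨0, by rw [if_neg hir]; exact h0 i (le_refl i), le_refl 0, by omega⟩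
    -- run the while loop
    have hw := pvWhileA_eq s zz i (s.length) m hm0 hmle (by
      have := pvRad_le s zz i (by omega); omega)
    -- the step in explicit form
    set rad : Int := (pvRad s zz i : Int) with hraddef
    set p1 : List Int := (if (i : Int) < r then p.set (i : Int).toNat
        (min (r - i + zz) (p.getD ((l + (r - i + zz)).toNat) 0)) else p) with hp1def
    have hstep : pvManStep s (s.length : Int) zz i (l, r, p) =
        (if (i : Int) + rad - zz > r
          then ((i : Int) - rad, (i : Int) + rad - zz, p1.set (i : Int).toNat rad)
          else (l, r, p1.set (i : Int).toNat rad)) := by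
      show (let t := r - i + zz
            let p1' := if (i : Int) < r then p.set (i : Int).toNat (min t (p.getD ((l + t).toNat) 0)) else p
            let pi0 := p1'.getD (i : Int).toNat 0
            let res := pvWhileA s (s.length : Int) s.length pi0 ((i : Int) - pi0) ((i : Int) + pi0 - zz)
            let p2 := p1'.set (i : Int).toNat res.1
            if res.2.2 > r then (res.2.1, res.2.2, p2) else (l, r, p2)) = _
      simp only [← hp1def, hp1, hw]
    rw [hstep]
    have hp1len : p1.length = p.length := by
      rw [hp1def]; split_ifs <;> simp
    have hgoal : ∀ l' r' : Int,
        ((l' = 0 ∧ r' = 0) ∨ ∃ i0 : Nat, i0 < i + 1 ∧ i0 < s.length ∧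
          l' = (i0 : Int) - (pvRad s zz i0 : Int) ∧ r' = (i0 : Int) + (pvRad s zz i0 : Int) - zz) →
        (((PySem.List.pyRange ((i : Int) + 1) (s.length : Int) 1).foldl
            (fun st x => pvManStep s (s.length : Int) zz x st)
            (l', r', p1.set (i : Int).toNat rad)).2.2).getD j 0 = (pvRad s zz j : Int) := by
      intro l' r' hlr'
      have hcast : ((i : Int) + 1) = ((i + 1 : Nat) : Int) := by omega
      rw [hcast]
      apply ih (i + 1) l' r' _ (by omega) (by simp [hp1len]; omega) ?_ ?_ hlr' j hj
      · intro j' hj'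
        rcases Nat.lt_or_ge j' i with hji | hji
        · rw [List.getD_eq_getElem?_getD, List.getElem?_set_ne (by omega),
              ← List.getD_eq_getElem?_getD]
          rw [hp1def]; split_ifs with hir
          · rw [List.getD_eq_getElem?_getD, List.getElem?_set_ne (by omega),
                ← List.getD_eq_getElem?_getD]
            exact ha j' hji
          · exact ha j' hji
        · have : j' = i := by omega
          subst this
          simp [List.getD_eq_getElem?_getD, hp1len, hip,
            Int.toNat_natCast, hraddef]
      · intro j' hj'
        rw [List.getD_eq_getElem?_getD, List.getElem?_set_ne (by omega),
            ← List.getD_eq_getElem?_getD]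
        rw [hp1def]; split_ifs with hir
        · rw [List.getD_eq_getElem?_getD, List.getElem?_set_ne (by omega),
              ← List.getD_eq_getElem?_getD]
          exact h0 j' (by omega)
        · exact h0 j' (by omega)
    split_ifs with hR
    · exact hgoal _ _ (Or.inr ⟨i, by omega, by omega, rfl, rfl⟩)
    · apply hgoal _ _ ?_
      rcases hlr with ⟨h1, h2⟩ | ⟨i0, h1, h2, h3, h4⟩
      · exact Or.inl ⟨h1, h2⟩
      · exact Or.inr ⟨i0, by omega, h2, h3, h4⟩


lemma pvReplicate_getD (k j : Nat) : (List.replicate k (0 : Int)).getD j 0 = 0 := by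
  simp only [List.getD_eq_getElem?_getD, List.getElem?_replicate]
  split <;> rfl

lemma pvManacher_getD (s : List Char) (zz : Int) (hzz : zz = 0 ∨ zz = 1) (init : List Int)
    (hlen : s.length ≤ init.length) (h0 : ∀ j : Nat, init.getD j 0 = 0)
    (j : Nat) (hj : j < s.length) :
    (pvManacher s (s.length : Int) zz init).getD j 0 = (pvRad s zz j : Int) := by
  unfold pvManacher
  have := pvManLoop_inv s zz hzz s.length 0 0 0 init (by omega) hlen
    (by intro j' hj'; omega) (by intro j' _; exact h0 j') (Or.inl ⟨rfl, rfl⟩) j hj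
  simpa using this

lemma pvTail_getD (xs : List Int) (k : Nat) : xs.tail.getD k 0 = xs.getD (k + 1) 0 := by
  cases xs <;> simp [List.getD_eq_getElem?_getD]

-- ===== VERDICT (by name: the statement is the Claim_ definition above) =====
theorem enumerate_palindromes_spec : Claim_equal_enumerate_palindromes := by
  intro S _
  show enumerate_palindromes S = enumerate_palindromes_alt S
  unfold enumerate_palindromes enumerate_palindromes_alt pvPalindromes
  simp only [List.getD_cons_zero, List.getD_cons_succ, PySem.List.slice_from_one]
  apply List.map_congr_left
  intro i hi
  rw [PySem.List.mem_pyRange_one] at hi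
  set s : List Char := S.toList with hs
  have hfd : PySem.Int.floordiv i 2 = i / 2 := by
    unfold PySem.Int.floordiv
    rw [Int.fdiv_eq_ediv, if_pos (Or.inl (by omega)), sub_zero]
  have hmd : PySem.Int.mod i 2 = i % 2 := by
    unfold PySem.Int.mod
    rw [Int.fmod_eq_emod, if_pos (Or.inl (by omega)), add_zero]
  have hc0 : 0 ≤ i / 2 := by omega
  have htn : ((i / 2).toNat : Int) = i / 2 := by omega
  by_cases hpar : i % 2 = 0
  · simp only [hfd, hmd, beq_iff_eq, hpar, if_pos]
    have hcn : (i / 2).toNat < s.length := by omega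
    rw [pvManacher_getD s 0 (Or.inl rfl) _ (by simp) (fun j => pvReplicate_getD _ _) _ hcn]
    rw [pvGrowOdd_eq s (i / 2) hc0 s.length 0 (le_refl 0)
      (by have := pvRad_le s 0 (i / 2) hc0; omega)
      (by have := pvRad_le s 0 (i / 2) hc0; omega)]
    rw [htn]
  · have hpar' : ¬ (PySem.Int.mod i 2 == 0) = true := by simp only [beq_iff_eq, hmd]; exact hpar
    simp only [hfd, if_neg hpar']
    have hcn : (i / 2).toNat + 1 < s.length := by omega
    rw [pvTail_getD, pvManacher_getD s 1 (Or.inr rfl) _ (by simp) (fun j => pvReplicate_getD _ _) _ hcn]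
    rw [pvGrowEven_eq s (i / 2) hc0 s.length 0 (le_refl 0)
      (by have := pvRad_le s 1 (i / 2 + 1) (by omega); omega)
      (by have := pvRad_le s 1 (i / 2 + 1) (by omega); omega)]
    have : (((i / 2).toNat + 1 : Nat) : Int) = i / 2 + 1 := by omega
    rw [this]
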